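-- pv_equiv track=rewrite | github.com/JacksonTaylorxyz/wordle | wordle.py | compare_guess_to_answer
-- ===== SOURCE A (Python) =====
-- no_match_character = '-'  # Letter is not in the answer
--
-- partial_match_character = '+'  # Letter is in the answer, but not this position
--
-- full_match_character = '*'  # Letter is in the answer, and the right position
--
-- def compare_guess_to_answer(guess, answer):
--     score = [no_match_character for _ in guess]
--
--     guess_unmatched_character_position = {}
--     answer_unmatched_character_position = {}
--
--     for i in range(len(answer)):
--         answer_unmatched_character_position[i] = answer[i]
--         guess_unmatched_character_position[i] = guess[i]
--
--     # Match everything that's a full match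
--     for index in range(len(guess)):
--         # If the letter in the index of the guess is the same as the one in
--         # the answer
--         if (answer_unmatched_character_position[index] ==
--            guess_unmatched_character_position[index]):
--             score[index] = full_match_character
--             del answer_unmatched_character_position[index]
--             del guess_unmatched_character_position[index]
--
--     # Go back and check for any partial matches
--     for key, value in guess_unmatched_character_position.items():
--         # Does the letter exist somewhere in the answer?
--         if value in answer_unmatched_character_position.values():
--             # Get a list of the remaining keys (indexes of the unaccounted
--             # for letters in the answer)
--             key_list = list(answer_unmatched_character_position.keys())
--             # Get a list of the remaining values in the answer
--             # (literal letters)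
--             val_list = list(answer_unmatched_character_position.values())
--
--             # Mark the score
--             score[key] = partial_match_character
--             # Get the key for where this letter exists in the answer (the
--             # index), and then remove it from the answers unmatched character
--             # positions
--             del answer_unmatched_character_position[
--                 key_list[val_list.index(value)]]
--
--     return score
-- ===== SOURCE B (Python) =====
-- no_match_character = '-'
-- partial_match_character = '+'
-- full_match_character = '*'
--
-- def compare_guess_to_answer(guess, answer):
--     # Count the answer's letters at mismatched positions, then one pass over
--     # the guess: full match, else partial if a counted letter remains.
--     counts = {}
--     for i in range(len(answer)):
--         if guess[i] != answer[i]: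
--             counts[answer[i]] = counts.get(answer[i], 0) + 1
--     score = []
--     for i in range(len(guess)):
--         g = guess[i]
--         if g == answer[i]:
--             score.append(full_match_character)
--         elif counts.get(g, 0) > 0:
--             score.append(partial_match_character)
--             counts[g] -= 1
--         else:
--             score.append(no_match_character)
--     return score
-- ===== Notes on version B (the rewrite author's own statement) =====
-- stated objective: faster
-- what changed: Replaces the index-keyed unmatched-position dicts and the inner values()/index() scans by a single letter-count dict decremented per partial match in one left-to-right pass.
import Mathlib
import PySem

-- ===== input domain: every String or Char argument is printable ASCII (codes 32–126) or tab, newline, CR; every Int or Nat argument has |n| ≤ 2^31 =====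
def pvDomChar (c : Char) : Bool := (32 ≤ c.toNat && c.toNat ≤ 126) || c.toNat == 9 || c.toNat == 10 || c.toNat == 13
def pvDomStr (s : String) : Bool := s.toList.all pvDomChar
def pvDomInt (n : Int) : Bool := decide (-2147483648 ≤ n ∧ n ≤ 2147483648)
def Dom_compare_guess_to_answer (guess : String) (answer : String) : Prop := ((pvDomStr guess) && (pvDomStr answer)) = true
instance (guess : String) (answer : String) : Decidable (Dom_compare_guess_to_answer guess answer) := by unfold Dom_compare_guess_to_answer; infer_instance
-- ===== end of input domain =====

-- B replaces A's index-keyed unmatched-position dicts and inner values()/index() scans by a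
-- letter-count dict decremented per partial match in one pass; equivalence is on the return value.

-- ===== PORT A =====
def compare_guess_to_answer (guess : String) (answer : String) : List String :=
  let gl := guess.toList
  let al := answer.toList
  let score0 := gl.map (fun _ => "-")
  -- for i in range(len(answer)): fill both dicts
  let dicts := (PySem.List.pyRange 0 (al.length : Int) 1).foldl
      (fun (p : PySem.Dict Int Char × PySem.Dict Int Char) i =>
        (p.1.insert i (PySem.List.pyGetD al i ' '), p.2.insert i (PySem.List.pyGetD gl i ' ')))
      (PySem.Dict.empty, PySem.Dict.empty)
  -- full-match loop (KeyError is impossible under Pre_: a missing key falls through unchanged)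
  let st1 := (PySem.List.pyRange 0 (gl.length : Int) 1).foldl
      (fun (st : List String × PySem.Dict Int Char × PySem.Dict Int Char) idx =>
        match st.2.1.get? idx, st.2.2.get? idx with
        | some x, some y =>
          if x = y then (st.1.set idx.toNat "*", st.2.1.erase idx, st.2.2.erase idx) else st
        | _, _ => st)
      (score0, dicts.1, dicts.2)
  -- partial-match loop over guess_unmatched.items()
  let st2 := st1.2.2.items.foldl
      (fun (q : List String × PySem.Dict Int Char) kv =>
        if q.2.values.contains kv.2 then
          let key_list := q.2.keys
          let val_list := q.2.values
          let score' := q.1.set kv.1.toNat "+"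
          match PySem.List.index? val_list kv.2 with
          | some j => (score', q.2.erase (PySem.List.pyGetD key_list (j : Int) 0))
          | none => (score', q.2)  -- unreachable: membership was checked
        else q)
      (st1.1, st1.2.1)
  st2.1

-- ===== PORT B =====
def compare_guess_to_answer_alt (guess : String) (answer : String) : List String :=
  let gl := guess.toList
  let al := answer.toList
  let counts := (PySem.List.pyRange 0 (al.length : Int) 1).foldl
      (fun (d : PySem.Dict Char Int) i =>
        if PySem.List.pyGetD gl i ' ' ≠ PySem.List.pyGetD al i ' ' then
          d.insert (PySem.List.pyGetD al i ' ')
            (d.getD (PySem.List.pyGetD al i ' ') 0 + 1)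
        else d)
      PySem.Dict.empty
  ((PySem.List.pyRange 0 (gl.length : Int) 1).foldl
      (fun (st : List String × PySem.Dict Char Int) i =>
        let g := PySem.List.pyGetD gl i ' '
        if g = PySem.List.pyGetD al i ' ' then (st.1 ++ ["*"], st.2)
        else if 0 < st.2.getD g 0 then (st.1 ++ ["+"], st.2.insert g (st.2.getD g 0 - 1))
        else (st.1 ++ ["-"], st.2))
      ([], counts)).1

-- ===== PRECONDITION & SPEC =====
-- A raises IndexError/KeyError whenever the two strings have different lengths; Pre_ excludes those.
def Pre_compare_guess_to_answer (guess : String) (answer : String) : Prop :=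
  guess.toList.length = answer.toList.length
instance (guess : String) (answer : String) : Decidable (Pre_compare_guess_to_answer guess answer) := by
  unfold Pre_compare_guess_to_answer; infer_instance
def pvWitness_compare_guess_to_answer : String × String := ("crane", "cheer")

def Spec_compare_guess_to_answer (guess : String) (answer : String) (out : List String) : Prop := out = compare_guess_to_answer_alt guess answer
instance (guess : String) (answer : String) (out : List String) : Decidable (Spec_compare_guess_to_answer guess answer out) := by unfold Spec_compare_guess_to_answer; infer_instance

-- ===== CLAIM (what is proved, stated in full; the proofs are below) =====
def Claim_equal_compare_guess_to_answer : Prop := ∀ (guess : String) (answer : String), Dom_compare_guess_to_answer guess answer → Pre_compare_guess_to_answer guess answer → Spec_compare_guess_to_answer guess answer (compare_guess_to_answer guess answer)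

-- ===== LEMMAS AND PROOFS =====

def itemsOf (f : Nat → Char) (ms : List Nat) : List (Int × Char) :=
  ms.map (fun (i : Nat) => ((i : Int), f i))

lemma foldl_set_getElem? (x : String) (ks : List Nat) (s : List String) (i : Nat) :
    (ks.foldl (fun s j => s.set j x) s)[i]? =
      if i ∈ ks then s[i]?.map (fun _ => x) else s[i]? := by
  induction ks generalizing s with
  | nil => simp
  | cons j t ih =>
    rw [List.foldl_cons, ih]
    by_cases hij : i = j
    · subst hij
      by_cases ht : i ∈ t <;>
        simp only [ht, if_true, if_false, List.getElem?_set, if_pos rfl] <;>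
        rcases Nat.lt_or_ge i s.length with h | h
      · simp [List.getElem?_eq_getElem, h, Option.map]
      · simp [List.getElem?_eq_none h, Nat.not_lt.mpr h, Option.map]
      · simp [List.getElem?_eq_getElem, h, Option.map]
      · simp [List.getElem?_eq_none h, Nat.not_lt.mpr h, Option.map]
    · by_cases ht : i ∈ t <;> simp [ht, hij, List.getElem?_set, Ne.symm hij]

lemma get?_mkItems (f : Nat → Char) (ms : List Nat) (k : Nat) :
    (PySem.Dict.mk (itemsOf f ms)).get? (k : Int) = if k ∈ ms then some (f k) else none := by
  induction ms with
  | nil => simp [itemsOf, PySem.Dict.get?]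
  | cons m t ih =>
    by_cases h : m = k
    · subst h; simp [itemsOf, PySem.Dict.get?, List.find?_cons]
    · simp only [itemsOf, List.map_cons, PySem.Dict.get?] at ih ⊢
      rw [List.find?_cons_of_neg]
      · simpa [Ne.symm h] using ih
      · simp [h]

lemma erase_mkItems (f : Nat → Char) (ms : List Nat) (k : Nat) :
    (PySem.Dict.mk (itemsOf f ms)).erase (k : Int)
      = PySem.Dict.mk (itemsOf f (ms.filter (fun m => m ≠ k))) := by
  simp only [PySem.Dict.erase, itemsOf, List.filter_map]
  congr 1
  congr 1
  apply List.filter_congr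
  intro m _
  simp [Function.comp, beq_eq_decide]

lemma values_mkItems (f : Nat → Char) (ms : List Nat) :
    (PySem.Dict.mk (itemsOf f ms)).values = ms.map f := by
  simp [PySem.Dict.values, itemsOf, List.map_map, Function.comp]

lemma keys_mkItems (f : Nat → Char) (ms : List Nat) :
    (PySem.Dict.mk (itemsOf f ms)).keys = ms.map (fun (i : Nat) => (i : Int)) := by
  simp [PySem.Dict.keys, itemsOf, List.map_map, Function.comp]

lemma nodup_filter_ne_eraseIdx (ms : List Nat) (h : ms.Nodup) (j : Nat) (hj : j < ms.length) :
    ms.filter (fun m => m ≠ ms[j]) = ms.eraseIdx j := by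
  have h1 : ms.erase ms[j] = ms.filter (fun m => m != ms[j]) := h.erase_eq_filter ms[j]
  have h2 : ms.erase ms[j] = ms.eraseIdx j := by
    rw [List.erase_eq_eraseIdx]
    have : List.idxOf? ms[j] ms = some j := by
      rw [List.idxOf?_eq_some_iff]
      exact ⟨hj, rfl, fun k hk => by
        intro heq
        exact absurd (h.getElem_inj_iff.mp heq) (Nat.ne_of_lt hk)⟩
    rw [this]
  rw [← h2, h1]
  apply List.filter_congr
  intro m _
  simp [bne, beq_eq_decide]

lemma init_eq (xs : List Char) (n : Nat) :
    (((List.range n).map (fun (k : Nat) => (k : Int))).foldl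
        (fun (d : PySem.Dict Int Char) i => d.insert i (PySem.List.pyGetD xs i ' '))
        PySem.Dict.empty)
      = PySem.Dict.mk (itemsOf (fun i => xs.getD i ' ') (List.range n)) := by
  apply PySem.Dict.ext
  rw [PySem.Dict.items_foldl_insert_fresh ((List.range n).map (fun (k : Nat) => (k : Int)))
        (fun i => i) (fun i => PySem.List.pyGetD xs i ' ') PySem.Dict.empty
        (by intro a _; simp [PySem.Dict.contains_empty])
        (by
          have hinj : Function.Injective (fun k : Nat => (k : Int)) := fun a b h => by
            simp only [Int.natCast_inj] at h; exact h
          simpa using (List.nodup_range (n := n)).map hinj)]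
  simp only [PySem.Dict.empty, List.nil_append, List.map_map, itemsOf]
  simp [Function.comp, PySem.List.pyGetD_natCast]

lemma M_simp (fa fg : Nat → Char) (n : Nat) :
    (List.range n).filter (fun m => !(((List.range n).filter (fun i => fa i == fg i)).contains m))
      = (List.range n).filter (fun m => !(fa m == fg m)) := by
  apply List.filter_congr
  intro m hm
  simp [List.mem_filter, hm, beq_eq_decide]

lemma itemsOf_eq_mapmap (f : Nat → Char) (ms : List Nat) :
    itemsOf f ms = (ms.map (fun i => (i, f i))).map (fun q => ((q.1 : Int), q.2)) := by
  simp [itemsOf, List.map_map, Function.comp]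

lemma loop1_eq (fa fg : Nat → Char) (js : List Nat) : ∀ (ms : List Nat) (score : List String),
    js.Nodup → (∀ j ∈ js, j ∈ ms) →
    ((js.map (fun (k : Nat) => (k : Int))).foldl
      (fun (st : List String × PySem.Dict Int Char × PySem.Dict Int Char) idx =>
        match st.2.1.get? idx, st.2.2.get? idx with
        | some x, some y =>
          if x = y then (st.1.set idx.toNat "*", st.2.1.erase idx, st.2.2.erase idx) else st
        | _, _ => st)
      (score, PySem.Dict.mk (itemsOf fa ms), PySem.Dict.mk (itemsOf fg ms)))
    = ((js.filter (fun i => fa i == fg i)).foldl (fun s i => s.set i "*") score,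
       PySem.Dict.mk (itemsOf fa (ms.filter (fun m => !((js.filter (fun i => fa i == fg i)).contains m)))),
       PySem.Dict.mk (itemsOf fg (ms.filter (fun m => !((js.filter (fun i => fa i == fg i)).contains m))))) := by
  induction js with
  | nil =>
    intro ms score _ _
    simp
  | cons j t ih =>
    intro ms score hnd hsub
    have hjm : j ∈ ms := hsub j (List.mem_cons_self)
    rw [List.map_cons, List.foldl_cons]
    have hget1 : (PySem.Dict.mk (itemsOf fa ms)).get? ((j : Nat) : Int) = some (fa j) := by
      rw [get?_mkItems]; simp [hjm]
    have hget2 : (PySem.Dict.mk (itemsOf fg ms)).get? ((j : Nat) : Int) = some (fg j) := by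
      rw [get?_mkItems]; simp [hjm]
    by_cases heq : fa j = fg j
    · -- full match at j: set score, erase both dicts
      have step :
          (match (PySem.Dict.mk (itemsOf fa ms)).get? ((j : Nat) : Int),
                 (PySem.Dict.mk (itemsOf fg ms)).get? ((j : Nat) : Int) with
           | some x, some y =>
             if x = y then
               (score.set ((j : Nat) : Int).toNat "*",
                (PySem.Dict.mk (itemsOf fa ms)).erase ((j : Nat) : Int),
                (PySem.Dict.mk (itemsOf fg ms)).erase ((j : Nat) : Int))
             else (score, PySem.Dict.mk (itemsOf fa ms), PySem.Dict.mk (itemsOf fg ms))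
           | _, _ => (score, PySem.Dict.mk (itemsOf fa ms), PySem.Dict.mk (itemsOf fg ms)))
          = (score.set j "*",
             PySem.Dict.mk (itemsOf fa (ms.filter (fun m => m ≠ j))),
             PySem.Dict.mk (itemsOf fg (ms.filter (fun m => m ≠ j)))) := by
        rw [hget1, hget2]
        simp [heq, erase_mkItems]
      rw [step]
      rw [ih (ms.filter (fun m => m ≠ j)) (score.set j "*") hnd.of_cons
          (by
            intro i hi
            rw [List.mem_filter]
            refine ⟨hsub i (List.mem_cons_of_mem _ hi), ?_⟩
            have : i ≠ j := by
              intro h; exact (List.nodup_cons.mp hnd).1 (h ▸ hi)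
            simp [this])]
      have hfil : (j :: t).filter (fun i => fa i == fg i) = j :: t.filter (fun i => fa i == fg i) := by
        simp [List.filter_cons, heq]
      have hflt : (ms.filter (fun m => m ≠ j)).filter
            (fun m => !((t.filter (fun i => fa i == fg i)).contains m))
          = ms.filter (fun m => !((j :: t.filter (fun i => fa i == fg i)).contains m)) := by
        rw [List.filter_filter]
        apply List.filter_congr
        intro m _
        by_cases hmj : m = j
        · subst hmj; simp
        · simp [hmj]
      rw [hfil, List.foldl_cons, hflt]
    · -- no match at j: state unchanged
      have step :
          (match (PySem.Dict.mk (itemsOf fa ms)).get? ((j : Nat) : Int),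
                 (PySem.Dict.mk (itemsOf fg ms)).get? ((j : Nat) : Int) with
           | some x, some y =>
             if x = y then
               (score.set ((j : Nat) : Int).toNat "*",
                (PySem.Dict.mk (itemsOf fa ms)).erase ((j : Nat) : Int),
                (PySem.Dict.mk (itemsOf fg ms)).erase ((j : Nat) : Int))
             else (score, PySem.Dict.mk (itemsOf fa ms), PySem.Dict.mk (itemsOf fg ms))
           | _, _ => (score, PySem.Dict.mk (itemsOf fa ms), PySem.Dict.mk (itemsOf fg ms)))
          = (score, PySem.Dict.mk (itemsOf fa ms), PySem.Dict.mk (itemsOf fg ms)) := by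
        rw [hget1, hget2]
        simp [heq]
      rw [step, ih ms score hnd.of_cons (fun i hi => hsub i (List.mem_cons_of_mem _ hi))]
      have hfil : (j :: t).filter (fun i => fa i == fg i) = t.filter (fun i => fa i == fg i) := by
        simp [List.filter_cons, heq]
      rw [hfil]

def plusIdx : List (Nat × Char) → List Char → List Nat
  | [], _ => []
  | q :: t, rem => if q.2 ∈ rem then q.1 :: plusIdx t (rem.erase q.2) else plusIdx t rem

lemma loop2_eq (fa : Nat → Char) (L : List (Nat × Char)) : ∀ (ms : List Nat) (score : List String),
    ms.Nodup →
    (((L.map (fun q => ((q.1 : Int), q.2))).foldl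
      (fun (q : List String × PySem.Dict Int Char) kv =>
        if q.2.values.contains kv.2 then
          match PySem.List.index? q.2.values kv.2 with
          | some j => (q.1.set kv.1.toNat "+", q.2.erase (PySem.List.pyGetD q.2.keys (j : Int) 0))
          | none => (q.1.set kv.1.toNat "+", q.2)
        else q)
      (score, PySem.Dict.mk (itemsOf fa ms))).1)
    = (plusIdx L (ms.map fa)).foldl (fun s i => s.set i "+") score := by
  induction L with
  | nil => intro ms score _; simp [plusIdx]
  | cons q t ih =>
    obtain ⟨i, c⟩ := q
    intro ms score hnd
    rw [List.map_cons, List.foldl_cons]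
    by_cases hc : c ∈ ms.map fa
    · -- partial match: set '+', erase the first matching answer slot
      obtain ⟨j, hj⟩ := Option.isSome_iff_exists.mp (List.isSome_idxOf?.mpr hc)
      obtain ⟨hjlt, hjval, -⟩ := List.idxOf?_eq_some_iff.mp hj
      have hvals : (PySem.Dict.mk (itemsOf fa ms)).values = ms.map fa := values_mkItems fa ms
      have hkeys : (PySem.Dict.mk (itemsOf fa ms)).keys = ms.map (fun (k : Nat) => (k : Int)) :=
        keys_mkItems fa ms
      have hjlt' : j < ms.length := by simpa using hjlt
      have hkey : PySem.List.pyGetD (ms.map (fun (k : Nat) => (k : Int))) (j : Int) 0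
          = ((ms[j] : Nat) : Int) := by
        rw [PySem.List.pyGetD_natCast]
        rw [List.getD_eq_getElem _ _ (by simpa using hjlt')]
        simp
      have step :
          (if (PySem.Dict.mk (itemsOf fa ms)).values.contains c then
            match PySem.List.index? (PySem.Dict.mk (itemsOf fa ms)).values c with
            | some j => (score.set ((i : Nat) : Int).toNat "+",
                (PySem.Dict.mk (itemsOf fa ms)).erase
                  (PySem.List.pyGetD (PySem.Dict.mk (itemsOf fa ms)).keys (j : Int) 0))
            | none => (score.set ((i : Nat) : Int).toNat "+", PySem.Dict.mk (itemsOf fa ms))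
          else (score, PySem.Dict.mk (itemsOf fa ms)))
          = (score.set i "+", PySem.Dict.mk (itemsOf fa (ms.eraseIdx j))) := by
        rw [hvals, hkeys]
        have hcont : (ms.map fa).contains c = true := by simpa using hc
        rw [if_pos hcont]
        show (match PySem.List.index? (ms.map fa) c with
          | some j => (score.set ((i : Nat) : Int).toNat "+",
              (PySem.Dict.mk (itemsOf fa ms)).erase
                (PySem.List.pyGetD (ms.map (fun (k : Nat) => (k : Int))) (j : Int) 0))
          | none => (score.set ((i : Nat) : Int).toNat "+", PySem.Dict.mk (itemsOf fa ms)))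
          = _
        rw [show PySem.List.index? (ms.map fa) c = some j from hj]
        show (score.set ((i : Nat) : Int).toNat "+",
            (PySem.Dict.mk (itemsOf fa ms)).erase
              (PySem.List.pyGetD (ms.map (fun (k : Nat) => (k : Int))) (j : Int) 0)) = _
        rw [hkey, erase_mkItems, nodup_filter_ne_eraseIdx ms hnd j hjlt']
        simp
      rw [step]
      rw [ih (ms.eraseIdx j) (score.set i "+") (hnd.eraseIdx j)]
      have herase : (ms.eraseIdx j).map fa = (ms.map fa).erase c := by
        rw [List.erase_eq_eraseIdx, hj]
        simp [List.eraseIdx_map]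
      rw [herase]
      have hplus : plusIdx ((i, c) :: t) (ms.map fa) = i :: plusIdx t ((ms.map fa).erase c) := by
        simp [plusIdx, hc]
      rw [hplus, List.foldl_cons]
    · -- letter not among remaining answer letters: skip
      have hvals : (PySem.Dict.mk (itemsOf fa ms)).values = ms.map fa := values_mkItems fa ms
      have hcont : (ms.map fa).contains c = false := by simpa using hc
      have step :
          (if (PySem.Dict.mk (itemsOf fa ms)).values.contains c then
            match PySem.List.index? (PySem.Dict.mk (itemsOf fa ms)).values c with
            | some j => (score.set ((i : Nat) : Int).toNat "+",
                (PySem.Dict.mk (itemsOf fa ms)).erase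
                  (PySem.List.pyGetD (PySem.Dict.mk (itemsOf fa ms)).keys (j : Int) 0))
            | none => (score.set ((i : Nat) : Int).toNat "+", PySem.Dict.mk (itemsOf fa ms))
          else (score, PySem.Dict.mk (itemsOf fa ms)))
          = (score, PySem.Dict.mk (itemsOf fa ms)) := by
        rw [hvals, if_neg (by simpa using hc)]
      rw [step, ih ms score hnd]
      have hplus : plusIdx ((i, c) :: t) (ms.map fa) = plusIdx t (ms.map fa) := by
        simp [plusIdx, hc]
      rw [hplus]

lemma initpair_eq (gl al : List Char) (n : Nat) :
    (((List.range n).map (fun (k : Nat) => (k : Int))).foldl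
      (fun (p : PySem.Dict Int Char × PySem.Dict Int Char) i =>
        (p.1.insert i (PySem.List.pyGetD al i ' '), p.2.insert i (PySem.List.pyGetD gl i ' ')))
      (PySem.Dict.empty, PySem.Dict.empty))
    = (PySem.Dict.mk (itemsOf (fun i => al.getD i ' ') (List.range n)),
       PySem.Dict.mk (itemsOf (fun i => gl.getD i ' ') (List.range n))) := by
  rw [PySem.List.foldl_prod_mk
        (f := fun (d : PySem.Dict Int Char) (i : Int) => d.insert i (PySem.List.pyGetD al i ' '))
        (g := fun (d : PySem.Dict Int Char) (i : Int) => d.insert i (PySem.List.pyGetD gl i ' '))]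
  rw [init_eq al, init_eq gl]

def misIdx (gl al : List Char) : List Nat :=
  (List.range gl.length).filter (fun m => !(al.getD m ' ' == gl.getD m ' '))

lemma A_char (guess answer : String) (hpre : guess.toList.length = answer.toList.length) :
    compare_guess_to_answer guess answer
      = (plusIdx ((misIdx guess.toList answer.toList).map (fun i => (i, guess.toList.getD i ' ')))
            ((misIdx guess.toList answer.toList).map (fun i => answer.toList.getD i ' '))).foldl
          (fun s i => s.set i "+")
          (((List.range guess.toList.length).filter
              (fun i => answer.toList.getD i ' ' == guess.toList.getD i ' ')).foldl
            (fun s i => s.set i "*") (guess.toList.map (fun _ => "-"))) := by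
  simp only [compare_guess_to_answer]
  rw [← hpre]
  simp only [PySem.List.pyRange_zero_natCast]
  rw [initpair_eq guess.toList answer.toList guess.toList.length]
  simp only []
  rw [loop1_eq (fun i => answer.toList.getD i ' ') (fun i => guess.toList.getD i ' ')
        (List.range guess.toList.length) (List.range guess.toList.length)
        (guess.toList.map (fun _ => "-")) List.nodup_range (fun j h => h)]
  simp only []
  rw [M_simp, itemsOf_eq_mapmap (fun i => guess.toList.getD i ' ')]
  rw [loop2_eq (fun i => answer.toList.getD i ' ')
        (((List.range guess.toList.length).filter
            (fun m => !(answer.toList.getD m ' ' == guess.toList.getD m ' '))).map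
          (fun i => (i, guess.toList.getD i ' ')))
        ((List.range guess.toList.length).filter
            (fun m => !(answer.toList.getD m ' ' == guess.toList.getD m ' ')))
        _ (List.nodup_range.filter _)]
  rfl

def wgo : List (Char × Char) → List Char → List String
  | [], _ => []
  | p :: t, rem =>
    if p.1 = p.2 then "*" :: wgo t rem
    else if p.1 ∈ rem then "+" :: wgo t (rem.erase p.1)
    else "-" :: wgo t rem

def wrem (ps : List (Char × Char)) : List Char :=
  (ps.filter (fun p => !(p.1 == p.2))).map (·.2)

def mrel : List (Char × Char) → List (Nat × Char)
  | [] => []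
  | p :: t =>
    if p.1 = p.2 then (mrel t).map (fun q => (q.1 + 1, q.2))
    else (0, p.1) :: (mrel t).map (fun q => (q.1 + 1, q.2))

lemma range_fold_pairs {σ : Type} (f : σ → (Char × Char) → σ) :
    ∀ (gl al : List Char), gl.length = al.length → ∀ (st : σ),
    (List.range gl.length).foldl (fun s i => f s (gl.getD i ' ', al.getD i ' ')) st
      = (gl.zip al).foldl f st := by
  intro gl
  induction gl with
  | nil => intro al h st; simp
  | cons g gt ih =>
    intro al h st
    cases al with
    | nil => simp at h
    | cons a at_ =>
      rw [List.length_cons, List.range_succ_eq_map, List.foldl_cons, List.foldl_map]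
      rw [show (fun (s : σ) (i : Nat) =>
            f s ((g :: gt).getD (Nat.succ i) ' ', (a :: at_).getD (Nat.succ i) ' '))
          = (fun s i => f s (gt.getD i ' ', at_.getD i ' ')) from rfl]
      rw [ih at_ (by simpa using h)]
      rw [List.zip_cons_cons, List.foldl_cons]
      rfl

lemma counts_eq (ps : List (Char × Char)) (c : Char) :
    ((ps.foldl
        (fun (d : PySem.Dict Char Int) p =>
          if p.1 ≠ p.2 then d.insert p.2 (d.getD p.2 0 + 1) else d)
        PySem.Dict.empty).getD c 0) = ((wrem ps).count c : Int) := by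
  have h1 : (ps.foldl
        (fun (d : PySem.Dict Char Int) p =>
          if p.1 ≠ p.2 then d.insert p.2 (d.getD p.2 0 + 1) else d)
        PySem.Dict.empty)
      = (ps.filter (fun p => !(p.1 == p.2))).foldl
          (fun (d : PySem.Dict Char Int) p => d.insert p.2 (d.getD p.2 0 + 1))
          PySem.Dict.empty := by
    rw [List.foldl_filter]
    congr 1
    funext d p
    by_cases h : p.1 = p.2 <;> simp [h]
  rw [h1, ← List.foldl_map (f := fun (p : Char × Char) => p.2)
        (g := fun (d : PySem.Dict Char Int) x => d.insert x (d.getD x 0 + 1))]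
  rw [PySem.Dict.getD_foldl_insert_add_one]
  simp [wrem]

lemma Bloop (ps : List (Char × Char)) : ∀ (rem : List Char) (d : PySem.Dict Char Int) (acc : List String),
    (∀ c, d.getD c 0 = (rem.count c : Int)) →
    ((ps.foldl
        (fun (st : List String × PySem.Dict Char Int) p =>
          if p.1 = p.2 then (st.1 ++ ["*"], st.2)
          else if 0 < st.2.getD p.1 0 then (st.1 ++ ["+"], st.2.insert p.1 (st.2.getD p.1 0 - 1))
          else (st.1 ++ ["-"], st.2))
        (acc, d)).1)
      = acc ++ wgo ps rem := by
  induction ps with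
  | nil => intro rem d acc _; simp [wgo]
  | cons p t ih =>
    intro rem d acc hinv
    rw [List.foldl_cons]
    by_cases hm : p.1 = p.2
    · simp only [hm, if_pos rfl, if_true]
      rw [ih rem d (acc ++ ["*"]) hinv]
      simp [wgo, hm]
    · by_cases hmem : p.1 ∈ rem
      · have hpos : 0 < d.getD p.1 0 := by
          rw [hinv p.1]
          exact_mod_cast List.count_pos_iff.mpr hmem
        simp only [if_neg hm, if_pos hpos]
        rw [ih (rem.erase p.1) (d.insert p.1 (d.getD p.1 0 - 1)) (acc ++ ["+"])
            (by
              intro c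
              rw [PySem.Dict.getD_insert]
              by_cases hc : c = p.1
              · rw [if_pos hc, hc, hinv p.1, List.count_erase_self]
                have hp : 0 < rem.count p.1 := List.count_pos_iff.mpr hmem
                omega
              · rw [if_neg hc, hinv c, List.count_erase_of_ne hc])]
        simp [wgo, hm, hmem]
      · have hzero : d.getD p.1 0 = 0 := by
          rw [hinv p.1]
          simp [List.count_eq_zero.mpr hmem]
        simp only [if_neg hm, hzero, lt_irrefl, if_false]
        rw [ih rem d (acc ++ ["-"]) hinv]
        simp [wgo, hm, hmem]

lemma B_eq_wgo (guess answer : String) (hpre : guess.toList.length = answer.toList.length) :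
    compare_guess_to_answer_alt guess answer
      = wgo (guess.toList.zip answer.toList) (wrem (guess.toList.zip answer.toList)) := by
  simp only [compare_guess_to_answer_alt]
  rw [← hpre]
  simp only [PySem.List.pyRange_zero_natCast, List.foldl_map]
  rw [show (fun (d : PySem.Dict Char Int) (i : Nat) =>
        if PySem.List.pyGetD guess.toList ((i : Nat) : Int) ' '
            ≠ PySem.List.pyGetD answer.toList ((i : Nat) : Int) ' ' then
          d.insert (PySem.List.pyGetD answer.toList ((i : Nat) : Int) ' ')
            (d.getD (PySem.List.pyGetD answer.toList ((i : Nat) : Int) ' ') 0 + 1)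
        else d)
      = (fun d i =>
          (fun (d : PySem.Dict Char Int) (p : Char × Char) =>
            if p.1 ≠ p.2 then d.insert p.2 (d.getD p.2 0 + 1) else d) d
          (guess.toList.getD i ' ', answer.toList.getD i ' ')) by
    funext d i
    simp [PySem.List.pyGetD_natCast]]
  rw [range_fold_pairs
        (fun (d : PySem.Dict Char Int) (p : Char × Char) =>
          if p.1 ≠ p.2 then d.insert p.2 (d.getD p.2 0 + 1) else d)
        guess.toList answer.toList hpre]
  rw [show (fun (st : List String × PySem.Dict Char Int) (i : Nat) =>
        if PySem.List.pyGetD guess.toList ((i : Nat) : Int) ' '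
            = PySem.List.pyGetD answer.toList ((i : Nat) : Int) ' ' then (st.1 ++ ["*"], st.2)
        else if 0 < st.2.getD (PySem.List.pyGetD guess.toList ((i : Nat) : Int) ' ') 0 then
          (st.1 ++ ["+"], st.2.insert (PySem.List.pyGetD guess.toList ((i : Nat) : Int) ' ')
            (st.2.getD (PySem.List.pyGetD guess.toList ((i : Nat) : Int) ' ') 0 - 1))
        else (st.1 ++ ["-"], st.2))
      = (fun st i =>
          (fun (st : List String × PySem.Dict Char Int) (p : Char × Char) =>
            if p.1 = p.2 then (st.1 ++ ["*"], st.2)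
            else if 0 < st.2.getD p.1 0 then (st.1 ++ ["+"], st.2.insert p.1 (st.2.getD p.1 0 - 1))
            else (st.1 ++ ["-"], st.2)) st
          (guess.toList.getD i ' ', answer.toList.getD i ' ')) by
    funext st i
    simp [PySem.List.pyGetD_natCast]]
  rw [range_fold_pairs
        (fun (st : List String × PySem.Dict Char Int) (p : Char × Char) =>
          if p.1 = p.2 then (st.1 ++ ["*"], st.2)
          else if 0 < st.2.getD p.1 0 then (st.1 ++ ["+"], st.2.insert p.1 (st.2.getD p.1 0 - 1))
          else (st.1 ++ ["-"], st.2))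
        guess.toList answer.toList hpre]
  rw [Bloop _ (wrem (guess.toList.zip answer.toList)) _ []
      (fun c => counts_eq (guess.toList.zip answer.toList) c)]
  simp

lemma plusIdx_shift (L : List (Nat × Char)) : ∀ (rem : List Char),
    plusIdx (L.map (fun q => (q.1 + 1, q.2))) rem = (plusIdx L rem).map (· + 1) := by
  induction L with
  | nil => intro rem; simp [plusIdx]
  | cons q t ih =>
    intro rem
    by_cases h : q.2 ∈ rem <;> simp [plusIdx, h, ih]

lemma plusIdx_mem_fst (L : List (Nat × Char)) : ∀ (rem : List Char) (i : Nat),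
    i ∈ plusIdx L rem → i ∈ L.map (·.1) := by
  induction L with
  | nil => intro rem i h; simp [plusIdx] at h
  | cons q t ih =>
    intro rem i h
    by_cases hq : q.2 ∈ rem
    · simp only [plusIdx, if_pos hq, List.mem_cons] at h
      rcases h with h | h
      · simp [h]
      · simp [List.mem_cons]
        right
        simpa using ih _ i h
    · simp only [plusIdx, if_neg hq] at h
      simp [List.mem_cons]
      right
      simpa using ih _ i h

lemma wgo_eq (ps : List (Char × Char)) : ∀ (rem : List Char),
    wgo ps rem = (List.range ps.length).map (fun i =>
      if (ps.getD i (' ', ' ')).1 = (ps.getD i (' ', ' ')).2 then "*"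
      else if i ∈ plusIdx (mrel ps) rem then "+" else "-") := by
  induction ps with
  | nil => intro rem; simp [wgo]
  | cons p t ih =>
    intro rem
    rw [List.length_cons, List.range_succ_eq_map]
    by_cases hm : p.1 = p.2
    · rw [show wgo (p :: t) rem = "*" :: wgo t rem by simp [wgo, hm]]
      rw [show mrel (p :: t) = (mrel t).map (fun q => (q.1 + 1, q.2)) by simp [mrel, hm]]
      rw [List.map_cons]
      congr 1
      · simp [hm]
      · rw [List.map_map, ih rem]
        apply List.map_congr_left
        intro i _
        simp only [Function.comp, Nat.succ_eq_add_one, List.getD_cons_succ, plusIdx_shift]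
        congr 1
        simp
    · by_cases hmem : p.1 ∈ rem
      · rw [show wgo (p :: t) rem = "+" :: wgo t (rem.erase p.1) by simp [wgo, hm, hmem]]
        rw [show mrel (p :: t) = (0, p.1) :: (mrel t).map (fun q => (q.1 + 1, q.2)) by
          simp [mrel, hm]]
        rw [List.map_cons]
        congr 1
        · simp [plusIdx, hm, hmem]
        · rw [List.map_map, ih (rem.erase p.1)]
          apply List.map_congr_left
          intro i _
          simp only [Function.comp, Nat.succ_eq_add_one, List.getD_cons_succ]
          rw [show plusIdx ((0, p.1) :: (mrel t).map (fun q => (q.1 + 1, q.2))) rem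
                = 0 :: plusIdx ((mrel t).map (fun q => (q.1 + 1, q.2))) (rem.erase p.1) by
              simp [plusIdx, hmem]]
          rw [plusIdx_shift]
          congr 1
          simp
      · rw [show wgo (p :: t) rem = "-" :: wgo t rem by simp [wgo, hm, hmem]]
        rw [show mrel (p :: t) = (0, p.1) :: (mrel t).map (fun q => (q.1 + 1, q.2)) by
          simp [mrel, hm]]
        rw [List.map_cons]
        congr 1
        · rw [show plusIdx ((0, p.1) :: (mrel t).map (fun q => (q.1 + 1, q.2))) rem
                = plusIdx ((mrel t).map (fun q => (q.1 + 1, q.2))) rem by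
              simp [plusIdx, hmem]]
          rw [plusIdx_shift]
          simp [hm]
        · rw [List.map_map, ih rem]
          apply List.map_congr_left
          intro i _
          simp only [Function.comp, Nat.succ_eq_add_one, List.getD_cons_succ]
          rw [show plusIdx ((0, p.1) :: (mrel t).map (fun q => (q.1 + 1, q.2))) rem
                = plusIdx ((mrel t).map (fun q => (q.1 + 1, q.2))) rem by
              simp [plusIdx, hmem]]
          rw [plusIdx_shift]
          congr 1
          simp

lemma mrel_eq (gl : List Char) : ∀ (al : List Char), gl.length = al.length →
    mrel (gl.zip al) = (misIdx gl al).map (fun i => (i, gl.getD i ' ')) := by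
  induction gl with
  | nil => intro al h; simp [mrel, misIdx]
  | cons g gt ih =>
    intro al h
    cases al with
    | nil => simp at h
    | cons a at_ =>
      have h' : gt.length = at_.length := by simpa using h
      by_cases hm : g = a
      · rw [show mrel ((g :: gt).zip (a :: at_)) = (mrel (gt.zip at_)).map (fun q => (q.1 + 1, q.2)) by
            simp [mrel, hm]]
        rw [ih at_ h']
        rw [show misIdx (g :: gt) (a :: at_) = (misIdx gt at_).map Nat.succ by
            simp only [misIdx, List.length_cons, List.range_succ_eq_map]
            rw [List.filter_cons, if_neg (by simp [hm]), List.filter_map]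
            congr 1]
        simp [List.map_map, Function.comp]
      · rw [show mrel ((g :: gt).zip (a :: at_))
              = (0, g) :: (mrel (gt.zip at_)).map (fun q => (q.1 + 1, q.2)) by
            simp [mrel, hm]]
        rw [ih at_ h']
        rw [show misIdx (g :: gt) (a :: at_) = 0 :: (misIdx gt at_).map Nat.succ by
            simp only [misIdx, List.length_cons, List.range_succ_eq_map]
            rw [List.filter_cons, if_pos (by simp [Ne.symm hm]), List.filter_map]
            congr 2]
        simp [List.map_map, Function.comp]

lemma wrem_eq (gl : List Char) : ∀ (al : List Char), gl.length = al.length →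
    wrem (gl.zip al) = (misIdx gl al).map (fun i => al.getD i ' ') := by
  induction gl with
  | nil => intro al h; simp [wrem, misIdx]
  | cons g gt ih =>
    intro al h
    cases al with
    | nil => simp at h
    | cons a at_ =>
      have h' : gt.length = at_.length := by simpa using h
      by_cases hm : g = a
      · rw [show wrem ((g :: gt).zip (a :: at_)) = wrem (gt.zip at_) by simp [wrem, hm]]
        rw [ih at_ h']
        rw [show misIdx (g :: gt) (a :: at_) = (misIdx gt at_).map Nat.succ by
            simp only [misIdx, List.length_cons, List.range_succ_eq_map]
            rw [List.filter_cons, if_neg (by simp [hm]), List.filter_map]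
            congr 1]
        simp [List.map_map, Function.comp]
      · rw [show wrem ((g :: gt).zip (a :: at_)) = a :: wrem (gt.zip at_) by simp [wrem, hm]]
        rw [ih at_ h']
        rw [show misIdx (g :: gt) (a :: at_) = 0 :: (misIdx gt at_).map Nat.succ by
            simp only [misIdx, List.length_cons, List.range_succ_eq_map]
            rw [List.filter_cons, if_pos (by simp [Ne.symm hm]), List.filter_map]
            congr 2]
        simp [List.map_map, Function.comp]

lemma B_char (guess answer : String) (hpre : guess.toList.length = answer.toList.length) :
    compare_guess_to_answer_alt guess answer
      = (List.range guess.toList.length).map (fun i =>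
          if answer.toList.getD i ' ' = guess.toList.getD i ' ' then "*"
          else if i ∈ plusIdx
              ((misIdx guess.toList answer.toList).map (fun i => (i, guess.toList.getD i ' ')))
              ((misIdx guess.toList answer.toList).map (fun i => answer.toList.getD i ' '))
            then "+" else "-") := by
  rw [B_eq_wgo guess answer hpre, wgo_eq, mrel_eq _ _ hpre, wrem_eq _ _ hpre]
  rw [show (guess.toList.zip answer.toList).length = guess.toList.length by simp [hpre]]
  apply List.map_congr_left
  intro i hi
  have hi' : i < guess.toList.length := List.mem_range.mp hi
  have hget : (guess.toList.zip answer.toList).getD i (' ', ' ')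
      = (guess.toList.getD i ' ', answer.toList.getD i ' ') := by
    rw [List.getD_eq_getElem _ _ (by rw [List.length_zip, ← hpre, Nat.min_self]; exact hi')]
    rw [List.getElem_zip]
    rw [List.getD_eq_getElem _ _ hi', List.getD_eq_getElem _ _ (hpre ▸ hi')]
  rw [hget]
  by_cases h : answer.toList.getD i ' ' = guess.toList.getD i ' '
  · rw [if_pos h.symm, if_pos h]
  · rw [if_neg (fun hh => h hh.symm), if_neg h]

theorem final_eq (guess answer : String) (hpre : guess.toList.length = answer.toList.length) :
    compare_guess_to_answer guess answer = compare_guess_to_answer_alt guess answer := by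
  rw [A_char guess answer hpre, B_char guess answer hpre]
  apply List.ext_getElem?
  intro i
  rw [foldl_set_getElem?, foldl_set_getElem?, List.getElem?_map, List.getElem?_map]
  by_cases hi : i < guess.toList.length
  · rw [List.getElem?_range hi, List.getElem?_eq_getElem hi]
    by_cases h : answer.toList.getD i ' ' = guess.toList.getD i ' '
    · have hmem : i ∈ (List.range guess.toList.length).filter
          (fun i => answer.toList.getD i ' ' == guess.toList.getD i ' ') :=
        List.mem_filter.mpr ⟨List.mem_range.mpr hi, beq_iff_eq.mpr h⟩
      have hnp : i ∉ plusIdx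
          ((misIdx guess.toList answer.toList).map (fun i => (i, guess.toList.getD i ' ')))
          ((misIdx guess.toList answer.toList).map (fun i => answer.toList.getD i ' ')) := by
        intro hin
        have hfst := plusIdx_mem_fst _ _ _ hin
        rw [List.map_map] at hfst
        have hmis : i ∈ misIdx guess.toList answer.toList := by simpa using hfst
        rw [misIdx, List.mem_filter] at hmis
        have : ¬ (answer.toList.getD i ' ' = guess.toList.getD i ' ') := by
          simpa using hmis.2
        exact this h
      rw [if_pos hmem, if_neg hnp]
      simp only [Option.map_some]
      rw [if_pos h]
    · have hnmem : i ∉ (List.range guess.toList.length).filter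
          (fun i => answer.toList.getD i ' ' == guess.toList.getD i ' ') := by
        intro hmm
        exact h (beq_iff_eq.mp (List.mem_filter.mp hmm).2)
      rw [if_neg hnmem]
      by_cases hp : i ∈ plusIdx
          ((misIdx guess.toList answer.toList).map (fun i => (i, guess.toList.getD i ' ')))
          ((misIdx guess.toList answer.toList).map (fun i => answer.toList.getD i ' '))
      · rw [if_pos hp]
        simp only [Option.map_some]
        rw [if_neg h, if_pos hp]
      · rw [if_neg hp]
        simp only [Option.map_some]
        rw [if_neg h, if_neg hp]
  · have h0 : guess.toList[i]? = none := List.getElem?_eq_none (by omega)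
    have hr : (List.range guess.toList.length)[i]? = none := by
      rw [List.getElem?_eq_none]
      simpa using Nat.le_of_not_lt hi
    rw [h0, hr]
    simp

-- ===== VERDICT (by name: the statement is the Claim_ definition above) =====
theorem compare_guess_to_answer_spec : Claim_equal_compare_guess_to_answer := by
  intro guess answer _hdom hpre
  unfold Spec_compare_guess_to_answer
  exact final_eq guess answer hpre
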